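-- pv_equiv track=rewrite | github.com/housing-hunter-hero/housing-hunter-hero | housing_hunter_hero/housing_hunter.py | smash_together
-- ===== SOURCE A (Python) =====
-- def smash_together(list_1, list_2):
-- 	"""
-- 	Combines two property lists based on the address of the property
-- 	:param list_1: an output from zip_scraper
-- 	:param list_2: an output from bed_bath_scraper
-- 	:return: a list of properties to be displayed to the user
-- 	"""
-- 	while list_2:
-- 		for x in range(len(list_1)):
-- 			if list_2[0].endswith(list_1[x][0]):
-- 				list_1[x].append(list_2[0])
-- 		list_2.pop(0)
-- 	results = []
-- 	for i in list_1:
-- 		if len(i) >= 3: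
-- 			results.append(i)
--
-- 	return results
-- ===== SOURCE B (Python) =====
-- def smash_together(list_1, list_2):
--     results = []
--     for row in list_1:
--         combined = row + [s for s in list_2 if s.endswith(row[0])]
--         if len(combined) >= 3:
--             results.append(combined)
--     return results
-- ===== Notes on version B (the rewrite author's own statement) =====
-- stated objective: simpler
-- what changed: B makes a single non-mutating pass over list_1, computing each row's suffix matches with one filter over list_2 and emitting it immediately, instead of A's outer while-pop loop over list_2 that mutates every row of list_1 followed by a separate filtering pass.
import Mathlib
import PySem

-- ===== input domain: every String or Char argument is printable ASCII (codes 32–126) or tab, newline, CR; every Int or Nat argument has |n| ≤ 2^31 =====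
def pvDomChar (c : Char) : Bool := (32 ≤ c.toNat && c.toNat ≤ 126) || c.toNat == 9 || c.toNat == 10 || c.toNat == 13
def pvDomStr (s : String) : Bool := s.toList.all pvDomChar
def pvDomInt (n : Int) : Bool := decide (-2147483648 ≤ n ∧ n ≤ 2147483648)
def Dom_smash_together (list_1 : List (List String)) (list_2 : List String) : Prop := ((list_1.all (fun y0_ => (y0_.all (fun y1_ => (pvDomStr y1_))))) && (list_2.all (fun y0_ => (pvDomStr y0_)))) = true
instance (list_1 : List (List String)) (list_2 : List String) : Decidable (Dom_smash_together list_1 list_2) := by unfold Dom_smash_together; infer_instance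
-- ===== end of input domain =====

-- B replaces A's mutating while-pop loop over list_2 plus a second filtering pass by one
-- non-mutating pass over list_1 (a filter of list_2 per row, emitted immediately); the
-- equivalence proved is about the RETURN value only (Python A mutates both arguments in place).

-- ===== PORT A =====
-- one step of A's inner `for x in range(len(list_1))`: append list_2[0] to every row it is a suffix of;
-- `list_1[x][0]` on an empty row is an IndexError (Pre_ excludes it); the [] branch is unreachable under Pre_.
def smashRowStep (s : String) (row : List String) : List String :=
  match row with
  | [] => []
  | a :: _ => if PySem.Str.endswith s a then row ++ [s] else row

def smash_together (list_1 : List (List String)) (list_2 : List String) : List (List String) :=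
  -- `while list_2: … ; list_2.pop(0)` consumes list_2 front to back
  let rows := list_2.foldl (fun rows s => rows.map (smashRowStep s)) list_1
  rows.foldl (fun results i => if 3 ≤ i.length then results ++ [i] else results) []

-- ===== PORT B =====
def smash_together_alt (list_1 : List (List String)) (list_2 : List String) : List (List String) :=
  list_1.foldl (fun results row =>
    let combined := row ++ list_2.filter (fun s =>
      PySem.Str.endswith s (match row with | [] => "" | a :: _ => a))
    if 3 ≤ combined.length then results ++ [combined] else results) []

-- ===== PRECONDITION & SPEC =====
-- Pre_ excludes exactly the inputs where Python A raises IndexError: an empty row of list_1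
-- evaluated against a nonempty list_2 (list_1[x][0] on an empty row).
def Pre_smash_together (list_1 : List (List String)) (list_2 : List String) : Prop :=
  list_2 ≠ [] → ∀ row ∈ list_1, row ≠ []
instance (list_1 : List (List String)) (list_2 : List String) : Decidable (Pre_smash_together list_1 list_2) := by unfold Pre_smash_together; infer_instance

def pvWitness_smash_together : List (List String) × List String :=
  ([["St", "x"], ["Ave", "y"]], ["1 Main St", "2 Oak Ave"])

def Spec_smash_together (list_1 : List (List String)) (list_2 : List String) (out : List (List String)) : Prop := out = smash_together_alt list_1 list_2
instance (list_1 : List (List String)) (list_2 : List String) (out : List (List String)) : Decidable (Spec_smash_together list_1 list_2 out) := by unfold Spec_smash_together; infer_instance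

-- ===== CLAIM (what is proved, stated in full; the proofs are below) =====
def Claim_equal_smash_together : Prop := ∀ (list_1 : List (List String)) (list_2 : List String), Dom_smash_together list_1 list_2 → Pre_smash_together list_1 list_2 → Spec_smash_together list_1 list_2 (smash_together list_1 list_2)

-- ===== LEMMAS AND PROOFS =====

-- A's outer fold over list_2 of a map over the rows commutes to one map of a per-row fold.
theorem smash_fold_map_swap (l2 : List String) (l1 : List (List String)) :
    l2.foldl (fun rows s => rows.map (smashRowStep s)) l1
      = l1.map (fun row => l2.foldl (fun r s => smashRowStep s r) row) := by
  induction l2 generalizing l1 with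
  | nil => simp
  | cons s t ih => simp [List.foldl_cons, ih, List.map_map, Function.comp_def]

-- the per-row fold on a nonempty row appends exactly the suffix matches, in list_2 order
theorem smash_row_fold (l2 : List String) (a : String) (t : List String) :
    l2.foldl (fun r s => smashRowStep s r) (a :: t)
      = a :: (t ++ l2.filter (fun s => PySem.Str.endswith s a)) := by
  induction l2 generalizing t with
  | nil => simp
  | cons s u ih =>
    cases h : PySem.Chars.endswith s.toList a.toList
    · have hstep : smashRowStep s (a :: t) = a :: t := by simp [smashRowStep, h]
      rw [List.foldl_cons, hstep, ih t]
      simp [List.filter_cons, h]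
    · have hstep : smashRowStep s (a :: t) = a :: (t ++ [s]) := by simp [smashRowStep, h]
      rw [List.foldl_cons, hstep, ih (t ++ [s])]
      simp [List.filter_cons, h]

-- ===== VERDICT (by name: the statement is the Claim_ definition above) =====
theorem smash_together_spec : Claim_equal_smash_together := by
  intro l1 l2 _ hpre
  unfold Spec_smash_together smash_together smash_together_alt
  by_cases h2 : l2 = []
  · subst h2; simp
  · have hall := hpre h2
    rw [smash_fold_map_swap, List.foldl_map]
    symm
    apply PySem.List.foldl_congr_mem
    intro acc row hrow
    obtain ⟨a, rt, rfl⟩ := List.exists_cons_of_ne_nil (hall row hrow)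
    rw [smash_row_fold]
    simp
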